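-- pv_equiv track=rewrite | github.com/dewanmukto-bd/python-simple-encryption | Pcryt_v0.1.2/pcryt_encryption.py | generatePad
-- ===== SOURCE A (Python) =====
-- def generatePad(seed, k, l):
--     # the N in the [N,k] LFSR is defined
--     N = len(seed)
--     # an empty list is created for collecting the output string
--     padOutput = []
--     # the linear scan
--     for index in range(l):
--         # the feedback
--         if seed[N-1]==seed[k]:
--             padOutput.append(0)
--         else:
--             padOutput.append(1)
--         # the shift
--         seed = seed[1:]
--         # the register
--         seed.append(padOutput[-1])
--     # the final output of a list of binary values
--     return padOutput
-- ===== SOURCE B (Python) =====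
-- def generatePad(seed, k, l):
--     # One append-only record: the seed followed by every emitted bit.  The
--     # register's last cell is always record[-1] and the tap is at the fixed
--     # end-relative offset k % len(seed) - len(seed), so nothing ever shifts.
--     # The pad is whatever was appended after the seed.
--     record = list(seed)
--     n = l
--     while n > 0:
--         record.append(int(record[-1] != record[k % len(seed) - len(seed)]))
--         n -= 1
--     return record[len(seed):]
-- ===== Notes on version B (the rewrite author's own statement) =====
-- stated objective: faster
-- what changed: B keeps one append-only record (seed followed by emitted bits) read at fixed end-relative offsets -1 and k%N-N and returns record[N:] at the end, instead of A's per-step register rebuild (seed[1:] copy + append) with a separate output list.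
import Mathlib
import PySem

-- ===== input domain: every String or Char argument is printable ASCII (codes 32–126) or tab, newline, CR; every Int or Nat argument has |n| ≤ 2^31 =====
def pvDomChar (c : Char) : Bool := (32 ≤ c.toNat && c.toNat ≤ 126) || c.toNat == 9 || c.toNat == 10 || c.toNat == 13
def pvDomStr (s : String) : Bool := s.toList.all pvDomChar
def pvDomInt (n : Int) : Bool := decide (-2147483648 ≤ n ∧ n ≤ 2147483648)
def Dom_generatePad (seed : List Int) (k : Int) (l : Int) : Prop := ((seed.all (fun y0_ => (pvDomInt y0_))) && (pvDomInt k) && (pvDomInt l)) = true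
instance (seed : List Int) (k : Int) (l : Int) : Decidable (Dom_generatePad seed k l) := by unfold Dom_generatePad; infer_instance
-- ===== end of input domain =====

-- B keeps one append-only record (seed ++ emitted bits) read at fixed end-relative
-- offsets and slices the pad off at the end, instead of A's per-step register
-- rebuild; return-value equivalence (neither program mutates the caller's list).

-- ===== PORT A =====
-- A's loop: emit 0 iff seed[N-1]==seed[k], then shift: seed = seed[1:] + [bit].
def generatePadLoopA (fuel : Nat) (seed : List Int) (k : Int) (out : List Int) : List Int :=
  match fuel with
  | 0 => out
  | n+1 =>
    let bit : Int :=
      if PySem.List.pyGet? seed ((seed.length : Int) - 1) = PySem.List.pyGet? seed k then 0 else 1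
    generatePadLoopA n (PySem.List.slice seed (some 1) none ++ [bit]) k (out ++ [bit])

def generatePad (seed : List Int) (k : Int) (l : Int) : List Int :=
  generatePadLoopA l.toNat seed k []

-- ===== PORT B =====
-- B's loop: append int(record[-1] != record[k % len(seed) - len(seed)]) to record.
def generatePadLoopB (n : Nat) (seedLen : Nat) (k : Int) (record : List Int) : List Int :=
  match n with
  | 0 => record
  | m+1 =>
    let bit : Int :=
      if PySem.List.pyGet? record (-1)
         ≠ PySem.List.pyGet? record (PySem.Int.mod k (seedLen : Int) - (seedLen : Int))
      then 1 else 0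
    generatePadLoopB m seedLen k (record ++ [bit])

def generatePad_alt (seed : List Int) (k : Int) (l : Int) : List Int :=
  PySem.List.slice (generatePadLoopB l.toNat seed.length k seed) (some (seed.length : Int)) none

-- ===== PRECONDITION & SPEC =====
-- Pre_ excludes exactly the inputs where Python A raises (IndexError on an empty
-- seed, or tap index k out of range, with at least one iteration).
def Pre_generatePad (seed : List Int) (k : Int) (l : Int) : Prop :=
  l ≤ 0 ∨ (seed ≠ [] ∧ -(seed.length : Int) ≤ k ∧ k < (seed.length : Int))
instance (seed : List Int) (k : Int) (l : Int) : Decidable (Pre_generatePad seed k l) := by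
  unfold Pre_generatePad; infer_instance

def pvWitness_generatePad : List Int × Int × Int := ([1, 0, 1, 1], 1, 6)

def Spec_generatePad (seed : List Int) (k : Int) (l : Int) (out : List Int) : Prop := out = generatePad_alt seed k l
instance (seed : List Int) (k : Int) (l : Int) (out : List Int) : Decidable (Spec_generatePad seed k l out) := by unfold Spec_generatePad; infer_instance

-- ===== CLAIM (what is proved, stated in full; the proofs are below) =====
def Claim_equal_generatePad : Prop := ∀ (seed : List Int) (k : Int) (l : Int), Dom_generatePad seed k l → Pre_generatePad seed k l → Spec_generatePad seed k l (generatePad seed k l)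

-- ===== LEMMAS AND PROOFS =====

-- Python indexing with -N ≤ k < N on a list of length N ≥ 1 reads position (k mod N).
lemma pyGet?_eq_emod (r : List Int) (k : Int) (h1 : -(r.length : Int) ≤ k)
    (h2 : k < (r.length : Int)) (h3 : r ≠ []) :
    PySem.List.pyGet? r k = r[(k % (r.length : Int)).toNat]? := by
  have hlen : 0 < r.length := List.length_pos_iff.mpr h3
  rcases le_or_gt 0 k with hk | hk
  · rw [PySem.List.pyGet?_of_nonneg r hk]
    congr 1
    have := Int.emod_eq_of_lt hk h2
    omega
  · have hk' : k = -(((-k).toNat : Nat) : Int) := by omega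
    rw [hk', PySem.List.pyGet?_neg_natCast _ _ (by omega) (by omega)]
    congr 1
    have e1 : (-(((-k).toNat : Nat) : Int)) % (r.length : Int)
        = ((r.length : Int) - ((-k).toNat : Nat)) % (r.length : Int) := by
      conv_lhs => rw [show (-(((-k).toNat : Nat) : Int))
        = ((r.length : Int) - ((-k).toNat : Nat)) + (r.length : Int) * (-1) by ring]
      rw [Int.add_mul_emod_self_left]
    have e2 : ((r.length : Int) - ((-k).toNat : Nat)) % (r.length : Int)
        = (r.length : Int) - ((-k).toNat : Nat) :=
      Int.emod_eq_of_lt (by omega) (by omega)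
    rw [e1, e2]
    omega

-- B's loop only appends: its result extends the record it starts from.
lemma loopB_prefix (fuel : Nat) (N : Nat) (k : Int) (s : List Int) :
    ∃ r, generatePadLoopB fuel N k s = s ++ r := by
  induction fuel generalizing s with
  | zero => exact ⟨[], by simp [generatePadLoopB]⟩
  | succ m ih =>
    obtain ⟨r, hr⟩ := ih (s ++ [if PySem.List.pyGet? s (-1)
      ≠ PySem.List.pyGet? s (PySem.Int.mod k (N : Int) - (N : Int)) then (1:Int) else 0])
    exact ⟨(if PySem.List.pyGet? s (-1)
      = PySem.List.pyGet? s (PySem.Int.mod k (N : Int) - (N : Int)) then (0:Int) else 1) :: r,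
      by simp only [generatePadLoopB]; rw [hr]; simp⟩

-- The loop invariant: A's register is the suffix s.drop i of B's flat record,
-- and A's accumulated output is what B has appended past the record so far.
lemma loop_eq (fuel : Nat) (i : Nat) (N : Nat) (k : Int) (s : List Int) (out : List Int)
    (hN : 0 < N) (hs : s.length = N + i)
    (h1 : -(N : Int) ≤ k) (h2 : k < (N : Int)) :
    generatePadLoopA fuel (s.drop i) k out
      = out ++ (generatePadLoopB fuel N k s).drop s.length := by
  induction fuel generalizing i s out with
  | zero => simp [generatePadLoopA, generatePadLoopB]
  | succ n ih =>
    have hr : (s.drop i).length = N := by simp [hs]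
    have hrne : s.drop i ≠ [] := by
      intro h; rw [← List.length_eq_zero_iff] at h; omega
    -- the two reads agree
    have hlast : PySem.List.pyGet? (s.drop i) (((s.drop i).length : Int) - 1)
        = PySem.List.pyGet? s (-1) := by
      rw [hr, PySem.List.pyGet?_neg_one]
      have h1' : ((N:Int) - 1) = ((N - 1 : Nat) : Int) := by omega
      rw [h1', PySem.List.pyGet?_natCast, List.getElem?_drop,
        List.getLast?_eq_getElem?]
      congr 1
      omega
    have htap : PySem.List.pyGet? (s.drop i) k
        = PySem.List.pyGet? s (PySem.Int.mod k (N : Int) - (N : Int)) := by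
      rw [pyGet?_eq_emod _ k (by omega) (by omega) hrne, hr]
      have hm : PySem.Int.mod k (N : Int) = k % (N : Int) := by
        simp only [PySem.Int.mod]
        rw [Int.fmod_eq_emod]
        have hN0 : (0:Int) ≤ (N:Int) := by positivity
        simp [hN0]
      have hnn : 0 ≤ k % (N : Int) := Int.emod_nonneg k (by omega)
      have hlt : k % (N : Int) < (N : Int) := Int.emod_lt_of_pos k (by omega)
      rw [hm]
      have hneg : k % (N:Int) - (N:Int) = -(((N - (k % (N:Int)).toNat : Nat)) : Int) := by
        omega
      rw [hneg, PySem.List.pyGet?_neg_natCast _ _ (by omega) (by omega)]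
      rw [List.getElem?_drop]
      congr 1
      omega
    simp only [generatePadLoopA, generatePadLoopB, hlast, htap]
    set bitB : Int := if PySem.List.pyGet? s (-1)
         ≠ PySem.List.pyGet? s (PySem.Int.mod k (N : Int) - (N : Int)) then 1 else 0 with hbitB
    have hbits : (if PySem.List.pyGet? s (-1)
         = PySem.List.pyGet? s (PySem.Int.mod k (N : Int) - (N : Int)) then (0:Int) else 1) = bitB := by
      rw [hbitB]; split_ifs <;> simp_all
    rw [hbits]
    have hshift : PySem.List.slice (s.drop i) (some 1) none ++ [bitB]
        = (s ++ [bitB]).drop (i + 1) := by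
      rw [PySem.List.slice_from_one, List.drop_append_of_le_length (by omega),
        ← List.drop_drop, List.drop_one]
    rw [hshift]
    rw [ih (i+1) (s ++ [bitB]) (out ++ [bitB]) (by simp [hs]; omega)]
    obtain ⟨r, hrB⟩ := loopB_prefix n N k (s ++ [bitB])
    rw [hrB]
    simp [List.drop_append]

-- ===== VERDICT (by name: the statement is the Claim_ definition above) =====
theorem generatePad_spec : Claim_equal_generatePad := by
  intro seed k l _ hpre
  unfold Spec_generatePad generatePad generatePad_alt
  rw [PySem.List.slice_from_natCast]
  rcases hpre with hl | ⟨hne, h1, h2⟩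
  · have : l.toNat = 0 := by omega
    simp [this, generatePadLoopA, generatePadLoopB]
  · have hN : 0 < seed.length := List.length_pos_iff.mpr hne
    have := loop_eq l.toNat 0 seed.length k seed [] hN (by simp) h1 h2
    simpa using this
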